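-- pv_equiv track=rewrite | github.com/adanzl/leetcode-practice | py/q2000/Q2088.py | countPyramids
-- ===== SOURCE A (Python) =====
-- from typing import List
--
-- def countPyramids(grid: List[List[int]]) -> int:
--     m, n = len(grid), len(grid[0])
--     # dp_u[i][j] 表示以grid[i][j]为顶的金字塔的高度 dp_dp[i][j] 反之
--     dp_u = [[grid[i][j] for j in range(n)] for i in range(m)]
--     dp_d = [[grid[i][j] for j in range(n)] for i in range(m)]
--     ans = 0
--     for i in range(m - 2, -1, -1):
--         for j in range(1, n - 1):
--             if grid[i][j] == 0:
--                 dp_u[i][j] = 0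
--             else:
--                 dp_u[i][j] = min(dp_u[i + 1][j - 1], dp_u[i + 1][j], dp_u[i + 1][j + 1]) + 1
--                 ans += dp_u[i][j] - 1
--     for i in range(1, m):
--         for j in range(1, n - 1):
--             if grid[i][j] == 0:
--                 dp_d[i][j] = 0
--             else:
--                 dp_d[i][j] = min(dp_d[i - 1][j - 1], dp_d[i - 1][j], dp_d[i - 1][j + 1]) + 1
--                 ans += dp_d[i][j] - 1
--     return ans
-- ===== SOURCE B (Python) =====
-- from typing import List
--
-- def countPyramids(grid: List[List[int]]) -> int:
--     m, n = len(grid), len(grid[0])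
--
--     memo_u = {}
--
--     def up(i, j):
--         # height of the pyramid apexed at (i, j), growing downward
--         if i == m - 1 or j == 0 or j == n - 1:
--             return grid[i][j]
--         if (i, j) in memo_u:
--             return memo_u[(i, j)]
--         v = 0 if grid[i][j] == 0 else \
--             min(up(i + 1, j - 1), up(i + 1, j), up(i + 1, j + 1)) + 1
--         memo_u[(i, j)] = v
--         return v
--
--     memo_d = {}
--
--     def down(i, j):
--         # height of the pyramid apexed at (i, j), growing upward
--         if i == 0 or j == 0 or j == n - 1:
--             return grid[i][j]
--         if (i, j) in memo_d:
--             return memo_d[(i, j)]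
--         v = 0 if grid[i][j] == 0 else \
--             min(down(i - 1, j - 1), down(i - 1, j), down(i - 1, j + 1)) + 1
--         memo_d[(i, j)] = v
--         return v
--
--     # apexes are visited moving away from the base row, so each memoized call
--     # recurses at most two levels deep
--     return sum(up(i, j) - 1 for i in range(m - 2, -1, -1)
--                for j in range(1, n - 1) if grid[i][j] != 0) \
--          + sum(down(i, j) - 1 for i in range(1, m)
--                for j in range(1, n - 1) if grid[i][j] != 0)
-- ===== Notes on version B (the rewrite author's own statement) =====
-- stated objective: alternative
-- what changed: A fills two bottom-up DP tables in place with nested index loops and accumulates inside the table-filling loop; B has no tables or in-place updates: it computes each apex's pyramid height by top-down memoized recursion (up/down helpers with a dict cache) and sums the heights with generator expressions.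
import Mathlib
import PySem

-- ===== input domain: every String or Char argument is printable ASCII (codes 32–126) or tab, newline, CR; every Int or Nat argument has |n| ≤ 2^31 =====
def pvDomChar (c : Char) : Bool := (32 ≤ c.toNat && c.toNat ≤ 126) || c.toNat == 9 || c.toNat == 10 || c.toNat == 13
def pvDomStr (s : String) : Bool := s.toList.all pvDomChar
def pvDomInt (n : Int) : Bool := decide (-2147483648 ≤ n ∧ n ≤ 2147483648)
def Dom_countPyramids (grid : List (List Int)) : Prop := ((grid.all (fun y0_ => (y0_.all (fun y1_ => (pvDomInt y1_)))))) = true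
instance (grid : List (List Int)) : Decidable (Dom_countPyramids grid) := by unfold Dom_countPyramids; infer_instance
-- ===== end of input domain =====

-- B replaces A's in-place bottom-up DP tables by top-down memoized recursion per apex,
-- summed with generator expressions (objective: alternative; return value only, A mutates
-- nothing the caller sees).

-- shared 2D accessor (grid[i][j] read; exact under Pre_, where every index is in range)
def pvGet2 (g : List (List Int)) (i j : Nat) : Int := (g.getD i []).getD j 0

-- write helper used only by port A (dp[i][j] = v)
def pvSet2 (g : List (List Int)) (i j : Nat) (v : Int) : List (List Int) :=
  g.set i ((g.getD i []).set j v)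

-- ===== PORT A =====
-- Nat-indexed transliteration; under Pre_ all indices are in range, so getD/set are exact.
-- range(m-2,-1,-1) = (List.range (m-1)).reverse and range(1,k) = List.range' 1 (k-1)
-- on the admitted inputs (both sides are empty exactly when the Python range is empty).
def countPyramids (grid : List (List Int)) : Int :=
  let m := grid.length
  let n := (grid.headD []).length
  let dp_u := (List.range m).map (fun i => (List.range n).map (fun j => pvGet2 grid i j))
  let dp_d := (List.range m).map (fun i => (List.range n).map (fun j => pvGet2 grid i j))
  let s1 := ((List.range (m - 1)).reverse).foldl (fun s i =>
      (List.range' 1 (n - 2)).foldl (fun (s : List (List Int) × Int) j =>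
        if pvGet2 grid i j == 0 then (pvSet2 s.1 i j 0, s.2)
        else
          let v := min (min (pvGet2 s.1 (i+1) (j-1)) (pvGet2 s.1 (i+1) j)) (pvGet2 s.1 (i+1) (j+1)) + 1
          (pvSet2 s.1 i j v, s.2 + (v - 1))) s) (dp_u, (0 : Int))
  let s2 := (List.range' 1 (m - 1)).foldl (fun s i =>
      (List.range' 1 (n - 2)).foldl (fun (s : List (List Int) × Int) j =>
        if pvGet2 grid i j == 0 then (pvSet2 s.1 i j 0, s.2)
        else
          let v := min (min (pvGet2 s.1 (i-1) (j-1)) (pvGet2 s.1 (i-1) j)) (pvGet2 s.1 (i-1) (j+1)) + 1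
          (pvSet2 s.1 i j v, s.2 + (v - 1))) s) (dp_d, s1.2)
  s2.2

-- ===== PORT B =====
-- up(i, j) of Source B: the memo dict is a pure cache, so the port is the plain recursion.
-- Source B only ever calls up with i < m; the `m - 1 ≤ i` guard is the same `i == m - 1`
-- base test on those calls and merely makes the recursion total (termination on m - i).
def pvUp (grid : List (List Int)) (m n i j : Nat) : Int :=
  if _h : m - 1 ≤ i ∨ j = 0 ∨ j = n - 1 then pvGet2 grid i j
  else if pvGet2 grid i j == 0 then 0
  else min (min (pvUp grid m n (i+1) (j-1)) (pvUp grid m n (i+1) j)) (pvUp grid m n (i+1) (j+1)) + 1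
termination_by m - i
decreasing_by all_goals omega

-- down(i, j) of Source B (no cache in the port, as above; recursion on i, base i == 0)
def pvDown (grid : List (List Int)) (n i j : Nat) : Int :=
  if _h : i = 0 ∨ j = 0 ∨ j = n - 1 then pvGet2 grid i j
  else if pvGet2 grid i j == 0 then 0
  else min (min (pvDown grid n (i-1) (j-1)) (pvDown grid n (i-1) j)) (pvDown grid n (i-1) (j+1)) + 1
termination_by i
decreasing_by all_goals omega

-- one row of Source B's generator expressions: sum of (f i j - 1) over interior nonzero j
def pvBRow (grid : List (List Int)) (f : Nat → Nat → Int) (n : Nat) (b : Int) (i : Nat) : Int :=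
  (List.range' 1 (n - 2)).foldl (fun (b : Int) j =>
    if pvGet2 grid i j == 0 then b else b + (f i j - 1)) b

def countPyramids_alt (grid : List (List Int)) : Int :=
  let m := grid.length
  let n := (grid.headD []).length
  ((List.range (m - 1)).reverse).foldl (pvBRow grid (pvUp grid m n) n) 0
    + (List.range' 1 (m - 1)).foldl (pvBRow grid (pvDown grid n) n) 0

-- ===== PRECONDITION & SPEC =====
-- Pre_ is exactly the set of inputs where Python A returns normally: A raises IndexError on
-- the empty grid (at grid[0]) and on any row shorter than len(grid[0]) (while building dp);
-- rows longer than len(grid[0]) are fine for both (their tail columns are never read).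
def Pre_countPyramids (grid : List (List Int)) : Prop :=
  grid ≠ [] ∧ ∀ r ∈ grid, (grid.headD []).length ≤ r.length
instance (grid : List (List Int)) : Decidable (Pre_countPyramids grid) := by
  unfold Pre_countPyramids; infer_instance
def pvWitness_countPyramids : List (List Int) := [[1, 1, 1], [1, 1, 1], [0, 1, 0]]

def Spec_countPyramids (grid : List (List Int)) (out : Int) : Prop := out = countPyramids_alt grid
instance (grid : List (List Int)) (out : Int) : Decidable (Spec_countPyramids grid out) := by
  unfold Spec_countPyramids; infer_instance

-- ===== CLAIM (what is proved, stated in full; the proofs are below) =====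
def Claim_equal_countPyramids : Prop := ∀ (grid : List (List Int)), Dom_countPyramids grid → Pre_countPyramids grid → Spec_countPyramids grid (countPyramids grid)

-- ===== LEMMAS AND PROOFS =====

-- A's inner-loop body on a fixed grid row `grow` and fixed previous dp row `prev`
def pvInner (grow prev : List Int) (t : List Int × Int) (j : Nat) : List Int × Int :=
  if grow.getD j 0 == 0 then (t.1.set j 0, t.2)
  else
    let v := min (min (prev.getD (j-1) 0) (prev.getD j 0)) (prev.getD (j+1) 0) + 1
    (t.1.set j v, t.2 + (v - 1))

def pvRowJs (grow prev : List Int) (js : List Nat) (cur : List Int) (a : Int) : List Int × Int :=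
  js.foldl (pvInner grow prev) (cur, a)

-- A's two outer-loop bodies as named functions (definitionally the lambdas of the port)
def pvUpBody (grid : List (List Int)) (n : Nat) (s : List (List Int) × Int) (i : Nat) :
    List (List Int) × Int :=
  (List.range' 1 (n - 2)).foldl (fun (s : List (List Int) × Int) j =>
    if pvGet2 grid i j == 0 then (pvSet2 s.1 i j 0, s.2)
    else
      let v := min (min (pvGet2 s.1 (i+1) (j-1)) (pvGet2 s.1 (i+1) j)) (pvGet2 s.1 (i+1) (j+1)) + 1
      (pvSet2 s.1 i j v, s.2 + (v - 1))) s

def pvDownBody (grid : List (List Int)) (n : Nat) (s : List (List Int) × Int) (i : Nat) :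
    List (List Int) × Int :=
  (List.range' 1 (n - 2)).foldl (fun (s : List (List Int) × Int) j =>
    if pvGet2 grid i j == 0 then (pvSet2 s.1 i j 0, s.2)
    else
      let v := min (min (pvGet2 s.1 (i-1) (j-1)) (pvGet2 s.1 (i-1) j)) (pvGet2 s.1 (i-1) (j+1)) + 1
      (pvSet2 s.1 i j v, s.2 + (v - 1))) s

theorem pvA_unfold (grid : List (List Int)) :
    countPyramids grid =
      ((List.range' 1 (grid.length - 1)).foldl (pvDownBody grid ((grid.headD []).length))
        ((List.range grid.length).map (fun i => (List.range ((grid.headD []).length)).map (fun j => pvGet2 grid i j)),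
         (((List.range (grid.length - 1)).reverse).foldl (pvUpBody grid ((grid.headD []).length))
           ((List.range grid.length).map (fun i => (List.range ((grid.headD []).length)).map (fun j => pvGet2 grid i j)),
            (0 : Int))).2)).2 := rfl

-- small getD/set facts
theorem pv_getD_set_self (l : List (List Int)) (i : Nat) (h : i < l.length) (r : List Int) :
    (l.set i r).getD i [] = r := by
  simp [List.getD_eq_getElem?_getD, h]

theorem pv_getD_set_ne (l : List (List Int)) (i k : Nat) (h : i ≠ k) (r : List Int) :
    (l.set i r).getD k [] = l.getD k [] := by
  simp [List.getD_eq_getElem?_getD, List.getElem?_set_ne h]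

theorem pv_getD_set_int (x : List Int) (j t : Nat) (v : Int) (hj : j < x.length) :
    (x.set j v).getD t 0 = if t = j then v else x.getD t 0 := by
  by_cases h : t = j
  · subst h
    simp [List.getD_eq_getElem?_getD, hj]
  · simp [List.getD_eq_getElem?_getD, List.getElem?_set_ne (fun e => h e.symm), h]

theorem pv_getD_take (r : List Int) (n t : Nat) (ht : t < n) :
    (r.take n).getD t 0 = r.getD t 0 := by
  simp [List.getD_eq_getElem?_getD, List.getElem?_take_of_lt ht]

-- A's inner loop over j writes only row i and reads the fixed rows i and i+1: it is pvRowJs.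
theorem pv_innerA_up (grid : List (List Int)) (i : Nat) :
    ∀ (js : List Nat) (dp : List (List Int)) (a : Int), i < dp.length →
    js.foldl (fun (s : List (List Int) × Int) j =>
        if pvGet2 grid i j == 0 then (pvSet2 s.1 i j 0, s.2)
        else
          let v := min (min (pvGet2 s.1 (i+1) (j-1)) (pvGet2 s.1 (i+1) j)) (pvGet2 s.1 (i+1) (j+1)) + 1
          (pvSet2 s.1 i j v, s.2 + (v - 1))) (dp, a)
      = (dp.set i (pvRowJs (grid.getD i []) (dp.getD (i+1) []) js (dp.getD i []) a).1,
         (pvRowJs (grid.getD i []) (dp.getD (i+1) []) js (dp.getD i []) a).2) := by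
  intro js
  induction js with
  | nil =>
      intro dp a h
      simp [pvRowJs, List.getElem?_eq_getElem h, List.set_getElem_self h]
  | cons j js ih =>
      intro dp a h
      rw [List.foldl_cons,
        show (if pvGet2 grid i j == 0 then (pvSet2 (dp, a).1 i j 0, (dp, a).2)
            else
              let v := min (min (pvGet2 (dp, a).1 (i+1) (j-1)) (pvGet2 (dp, a).1 (i+1) j)) (pvGet2 (dp, a).1 (i+1) (j+1)) + 1
              (pvSet2 (dp, a).1 i j v, (dp, a).2 + (v - 1)))
          = (dp.set i (pvInner (grid.getD i []) (dp.getD (i+1) []) (dp.getD i [], a) j).1,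
             (pvInner (grid.getD i []) (dp.getD (i+1) []) (dp.getD i [], a) j).2)
          from by simp only [pvInner, pvGet2, pvSet2]; split <;> rfl]
      rw [ih _ _ (by simpa using h)]
      rw [pv_getD_set_ne _ i (i+1) (by omega), pv_getD_set_self _ i h, List.set_set]
      rw [show pvRowJs (grid.getD i []) (dp.getD (i+1) []) (j :: js) (dp.getD i []) a
          = pvRowJs (grid.getD i []) (dp.getD (i+1) [])
              js (pvInner (grid.getD i []) (dp.getD (i+1) []) (dp.getD i [], a) j).1
              (pvInner (grid.getD i []) (dp.getD (i+1) []) (dp.getD i [], a) j).2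
          from rfl]

theorem pv_innerA_down (grid : List (List Int)) (i : Nat) :
    ∀ (js : List Nat) (dp : List (List Int)) (a : Int), i < dp.length → 1 ≤ i →
    js.foldl (fun (s : List (List Int) × Int) j =>
        if pvGet2 grid i j == 0 then (pvSet2 s.1 i j 0, s.2)
        else
          let v := min (min (pvGet2 s.1 (i-1) (j-1)) (pvGet2 s.1 (i-1) j)) (pvGet2 s.1 (i-1) (j+1)) + 1
          (pvSet2 s.1 i j v, s.2 + (v - 1))) (dp, a)
      = (dp.set i (pvRowJs (grid.getD i []) (dp.getD (i-1) []) js (dp.getD i []) a).1,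
         (pvRowJs (grid.getD i []) (dp.getD (i-1) []) js (dp.getD i []) a).2) := by
  intro js
  induction js with
  | nil =>
      intro dp a h h1
      simp [pvRowJs, List.getElem?_eq_getElem h, List.set_getElem_self h]
  | cons j js ih =>
      intro dp a h h1
      rw [List.foldl_cons,
        show (if pvGet2 grid i j == 0 then (pvSet2 (dp, a).1 i j 0, (dp, a).2)
            else
              let v := min (min (pvGet2 (dp, a).1 (i-1) (j-1)) (pvGet2 (dp, a).1 (i-1) j)) (pvGet2 (dp, a).1 (i-1) (j+1)) + 1
              (pvSet2 (dp, a).1 i j v, (dp, a).2 + (v - 1)))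
          = (dp.set i (pvInner (grid.getD i []) (dp.getD (i-1) []) (dp.getD i [], a) j).1,
             (pvInner (grid.getD i []) (dp.getD (i-1) []) (dp.getD i [], a) j).2)
          from by simp only [pvInner, pvGet2, pvSet2]; split <;> rfl]
      rw [ih _ _ (by simpa using h) h1]
      rw [pv_getD_set_ne _ i (i-1) (by omega), pv_getD_set_self _ i h, List.set_set]
      rw [show pvRowJs (grid.getD i []) (dp.getD (i-1) []) (j :: js) (dp.getD i []) a
          = pvRowJs (grid.getD i []) (dp.getD (i-1) [])
              js (pvInner (grid.getD i []) (dp.getD (i-1) []) (dp.getD i [], a) j).1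
              (pvInner (grid.getD i []) (dp.getD (i-1) []) (dp.getD i [], a) j).2
          from rfl]

-- the key row lemma: A's inner fold writes f-values into the row and accumulates B's row sum
theorem pv_row (grid : List (List Int)) (n i : Nat) (grow prev : List Int) (f : Nat → Int)
    (hgrow : ∀ t, t < n → grow.getD t 0 = pvGet2 grid i t)
    (hf0 : ∀ j, 1 ≤ j → j + 1 < n → pvGet2 grid i j = 0 → f j = 0)
    (hf : ∀ j, 1 ≤ j → j + 1 < n → pvGet2 grid i j ≠ 0 →
        f j = min (min (prev.getD (j-1) 0) (prev.getD j 0)) (prev.getD (j+1) 0) + 1) :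
    ∀ (js : List Nat) (cur : List Int) (a : Int),
    (∀ j ∈ js, 1 ≤ j ∧ j + 1 < n) → n ≤ cur.length →
    (∀ t, t < n → (pvRowJs grow prev js cur a).1.getD t 0
        = if t ∈ js then f t else cur.getD t 0)
    ∧ (pvRowJs grow prev js cur a).2
      = js.foldl (fun (b : Int) j => if pvGet2 grid i j == 0 then b else b + (f j - 1)) a := by
  intro js
  induction js with
  | nil => intro cur a _ _; exact ⟨fun t _ => by simp [pvRowJs], rfl⟩
  | cons j js ih =>
      intro cur a hjs hlen
      obtain ⟨hj1, hjn⟩ := hjs j (by simp)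
      have hjlt : j < cur.length := by omega
      have hcond : (grow.getD j 0 == 0) = (pvGet2 grid i j == 0) := by
        rw [hgrow j (by omega)]
      simp only [pvRowJs, List.foldl_cons] at *
      by_cases hc : pvGet2 grid i j = 0
      · rw [show pvInner grow prev (cur, a) j = (cur.set j 0, a) from by
            simp only [pvInner]; rw [hcond, if_pos (by simpa using hc)],
          if_pos (by simpa using hc)]
        have hv0 : f j = 0 := hf0 j hj1 hjn hc
        obtain ⟨h1, h2⟩ := ih (cur.set j 0) a (fun x hx => hjs x (by simp [hx]))
          (by simpa using hlen)
        refine ⟨fun t ht => ?_, h2⟩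
        rw [h1 t ht, pv_getD_set_int _ _ _ _ hjlt]
        by_cases htj : t ∈ js
        · simp [htj]
        · by_cases hte : t = j
          · simp [hte, hv0]
          · simp [htj, hte]
      · rw [show pvInner grow prev (cur, a) j
              = (cur.set j (min (min (prev.getD (j-1) 0) (prev.getD j 0)) (prev.getD (j+1) 0) + 1),
                 a + (min (min (prev.getD (j-1) 0) (prev.getD j 0)) (prev.getD (j+1) 0) + 1 - 1)) from by
            simp only [pvInner]; rw [hcond, if_neg (by simpa using hc)],
          if_neg (by simpa using hc)]
        have hv : f j = min (min (prev.getD (j-1) 0) (prev.getD j 0)) (prev.getD (j+1) 0) + 1 :=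
          hf j hj1 hjn hc
        obtain ⟨h1, h2⟩ := ih
          (cur.set j (min (min (prev.getD (j-1) 0) (prev.getD j 0)) (prev.getD (j+1) 0) + 1))
          (a + (min (min (prev.getD (j-1) 0) (prev.getD j 0)) (prev.getD (j+1) 0) + 1 - 1))
          (fun x hx => hjs x (by simp [hx])) (by simpa using hlen)
        refine ⟨fun t ht => ?_, by rw [h2, hv]⟩
        rw [h1 t ht, pv_getD_set_int _ _ _ _ hjlt]
        by_cases htj : t ∈ js
        · simp [htj]
        · by_cases hte : t = j
          · simp [hte, hv]
          · simp [htj, hte]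

-- A's up loop equals the fold of B's up row sums, given the dp-row invariant
theorem pv_outer_up (grid : List (List Int)) (n : Nat) :
    ∀ (k : Nat) (dp : List (List Int)) (a : Int),
    k ≤ grid.length - 1 → dp.length = grid.length →
    (∀ r, k ≤ r → r < grid.length → ∀ t, t < n →
        (dp.getD r []).getD t 0 = pvUp grid grid.length n r t) →
    (∀ r, r < k → (∀ t, t < n → (dp.getD r []).getD t 0 = pvGet2 grid r t)
        ∧ n ≤ (dp.getD r []).length) →
    (((List.range k).reverse).foldl (pvUpBody grid n) (dp, a)).2
      = ((List.range k).reverse).foldl (pvBRow grid (pvUp grid grid.length n) n) a := by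
  intro k
  induction k with
  | zero => intro dp a _ _ _ _; simp
  | succ k ih =>
      intro dp a hk hlen hdone htodo
      have hkm : k < grid.length - 1 := by omega
      have hklt : k < dp.length := by omega
      rw [List.range_succ, List.reverse_append, List.reverse_singleton, List.singleton_append,
        List.foldl_cons, List.foldl_cons]
      rw [show pvUpBody grid n (dp, a) k
          = (dp.set k (pvRowJs (grid.getD k []) (dp.getD (k+1) []) (List.range' 1 (n-2)) (dp.getD k []) a).1,
             (pvRowJs (grid.getD k []) (dp.getD (k+1) []) (List.range' 1 (n-2)) (dp.getD k []) a).2)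
          from pv_innerA_up grid k _ dp a hklt]
      have hprev : ∀ t, t < n → (dp.getD (k+1) []).getD t 0 = pvUp grid grid.length n (k+1) t :=
        fun t ht => hdone (k+1) (by omega) (by omega) t ht
      have hbase : ∀ j, j ∈ List.range' 1 (n - 2) → 1 ≤ j ∧ j + 1 < n := by
        intro j hj; rw [List.mem_range'_1] at hj; omega
      obtain ⟨hrow1, hrow2⟩ := pv_row grid n k (grid.getD k []) (dp.getD (k+1) [])
        (fun j => pvUp grid grid.length n k j)
        (fun t _ => rfl)
        (fun j hj1 hjn hz => by
          show pvUp grid grid.length n k j = 0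
          rw [pvUp.eq_def]
          rw [dif_neg (by omega)]
          simp [hz])
        (fun j hj1 hjn hz => by
          show pvUp grid grid.length n k j = _
          rw [pvUp.eq_def]
          rw [dif_neg (by omega)]
          rw [if_neg (by simpa using hz)]
          rw [hprev (j-1) (by omega), hprev j (by omega), hprev (j+1) (by omega)])
        (List.range' 1 (n-2)) (dp.getD k []) a hbase (htodo k (by omega)).2
      rw [ih (dp.set k (pvRowJs (grid.getD k []) (dp.getD (k+1) []) (List.range' 1 (n-2)) (dp.getD k []) a).1)
            ((pvRowJs (grid.getD k []) (dp.getD (k+1) []) (List.range' 1 (n-2)) (dp.getD k []) a).2)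
            (by omega) (by simpa using hlen)
            (fun r hr1 hr2 t ht => by
              by_cases hrk : r = k
              · rw [hrk, pv_getD_set_self _ _ hklt, hrow1 t ht]
                by_cases hmem : t ∈ List.range' 1 (n - 2)
                · simp [hmem]
                · rw [if_neg hmem]
                  have htedge : t = 0 ∨ t = n - 1 := by
                    rw [List.mem_range'_1] at hmem; omega
                  rw [(htodo k (by omega)).1 t ht, pvUp.eq_def, dif_pos (by omega)]
              · rw [pv_getD_set_ne _ _ _ (by omega)]
                exact hdone r (by omega) hr2 t ht)
            (fun r hr => by
              rw [pv_getD_set_ne _ _ _ (by omega)]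
              exact htodo r (by omega))]
      rw [hrow2]
      rfl

-- A's down loop equals the fold of B's down row sums
theorem pv_outer_down (grid : List (List Int)) (n : Nat) :
    ∀ (c k : Nat) (dp : List (List Int)) (a : Int),
    1 ≤ k → k + c ≤ grid.length → dp.length = grid.length →
    (∀ r, r < k → ∀ t, t < n → (dp.getD r []).getD t 0 = pvDown grid n r t) →
    (∀ r, k ≤ r → r < grid.length → (∀ t, t < n → (dp.getD r []).getD t 0 = pvGet2 grid r t)
        ∧ n ≤ (dp.getD r []).length) →
    ((List.range' k c).foldl (pvDownBody grid n) (dp, a)).2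
      = (List.range' k c).foldl (pvBRow grid (pvDown grid n) n) a := by
  intro c
  induction c with
  | zero => intro k dp a _ _ _ _ _; simp
  | succ c ih =>
      intro k dp a hk1 hkc hlen hdone htodo
      have hklt : k < dp.length := by omega
      rw [List.range'_succ, List.foldl_cons, List.foldl_cons]
      rw [show pvDownBody grid n (dp, a) k
          = (dp.set k (pvRowJs (grid.getD k []) (dp.getD (k-1) []) (List.range' 1 (n-2)) (dp.getD k []) a).1,
             (pvRowJs (grid.getD k []) (dp.getD (k-1) []) (List.range' 1 (n-2)) (dp.getD k []) a).2)
          from pv_innerA_down grid k _ dp a hklt hk1]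
      have hprev : ∀ t, t < n → (dp.getD (k-1) []).getD t 0 = pvDown grid n (k-1) t :=
        fun t ht => hdone (k-1) (by omega) t ht
      have hbase : ∀ j, j ∈ List.range' 1 (n - 2) → 1 ≤ j ∧ j + 1 < n := by
        intro j hj; rw [List.mem_range'_1] at hj; omega
      obtain ⟨hrow1, hrow2⟩ := pv_row grid n k (grid.getD k []) (dp.getD (k-1) [])
        (fun j => pvDown grid n k j)
        (fun t _ => rfl)
        (fun j hj1 hjn hz => by
          show pvDown grid n k j = 0
          rw [pvDown.eq_def]
          rw [dif_neg (by omega)]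
          simp [hz])
        (fun j hj1 hjn hz => by
          show pvDown grid n k j = _
          rw [pvDown.eq_def]
          rw [dif_neg (by omega)]
          rw [if_neg (by simpa using hz)]
          rw [hprev (j-1) (by omega), hprev j (by omega), hprev (j+1) (by omega)])
        (List.range' 1 (n-2)) (dp.getD k []) a hbase (htodo k (by omega) (by omega)).2
      rw [ih (k+1)
            (dp.set k (pvRowJs (grid.getD k []) (dp.getD (k-1) []) (List.range' 1 (n-2)) (dp.getD k []) a).1)
            ((pvRowJs (grid.getD k []) (dp.getD (k-1) []) (List.range' 1 (n-2)) (dp.getD k []) a).2)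
            (by omega) (by omega) (by simpa using hlen)
            (fun r hr t ht => by
              by_cases hrk : r = k
              · rw [hrk, pv_getD_set_self _ _ hklt, hrow1 t ht]
                by_cases hmem : t ∈ List.range' 1 (n - 2)
                · simp [hmem]
                · rw [if_neg hmem]
                  have htedge : t = 0 ∨ t = n - 1 := by
                    rw [List.mem_range'_1] at hmem; omega
                  rw [(htodo k (by omega) (by omega)).1 t ht, pvDown.eq_def, dif_pos (by omega)]
              · rw [pv_getD_set_ne _ _ _ (by omega)]
                exact hdone r (by omega) t ht)
            (fun r hr1 hr2 => by
              rw [pv_getD_set_ne _ _ _ (by omega)]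
              exact htodo r (by omega) hr2)]
      rw [hrow2]
      rfl

-- accumulator shift: both of B's folds only add to the accumulator
theorem pvBRow_add (grid : List (List Int)) (f : Nat → Nat → Int) (i : Nat) :
    ∀ (js : List Nat) (b : Int),
    js.foldl (fun (b : Int) j => if pvGet2 grid i j == 0 then b else b + (f i j - 1)) b
      = b + js.foldl (fun (b : Int) j => if pvGet2 grid i j == 0 then b else b + (f i j - 1)) 0 := by
  intro js
  induction js with
  | nil => intro b; simp
  | cons j js ih =>
      intro b
      simp only [List.foldl_cons]
      by_cases hc : pvGet2 grid i j = 0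
      · rw [if_pos (by simpa using hc), if_pos (by simpa using hc)]
        exact ih b
      · rw [if_neg (by simpa using hc), if_neg (by simpa using hc)]
        rw [ih (b + (f i j - 1)), ih (0 + (f i j - 1))]
        ring

theorem pv_fold_add (grid : List (List Int)) (f : Nat → Nat → Int) (n : Nat) :
    ∀ (l : List Nat) (a : Int),
    l.foldl (pvBRow grid f n) a = a + l.foldl (pvBRow grid f n) 0 := by
  intro l
  induction l with
  | nil => intro a; simp
  | cons i l ih =>
      intro a
      simp only [List.foldl_cons]
      rw [show pvBRow grid f n a i = a + pvBRow grid f n 0 i from by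
        unfold pvBRow
        rw [pvBRow_add grid f i _ a]]
      rw [ih (a + pvBRow grid f n 0 i), ih (pvBRow grid f n 0 i)]
      ring

-- the initial dp tables are the n-truncated grid rows
theorem pv_init (grid : List (List Int)) (n : Nat) (h : ∀ r ∈ grid, n ≤ r.length) :
    (List.range grid.length).map (fun i => (List.range n).map (fun j => pvGet2 grid i j))
      = grid.map (fun r => r.take n) := by
  apply List.ext_getElem
  · simp
  · intro i h1 h2
    have hi : i < grid.length := by simpa using h2
    simp only [List.getElem_map, List.getElem_range]
    apply List.ext_getElem
    · simp [h grid[i] (List.getElem_mem hi)]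
    · intro t ht1 ht2
      have htn : t < n := by simpa using ht1
      have htl : t < grid[i].length := by
        have := h grid[i] (List.getElem_mem hi); omega
      simp [pvGet2, List.getD_eq_getElem?_getD, List.getElem?_eq_getElem hi,
        List.getElem?_eq_getElem htl, List.getElem_take]

theorem pv_getD_map_take (grid : List (List Int)) (n i : Nat) (hi : i < grid.length) :
    (grid.map (fun r => r.take n)).getD i [] = (grid.getD i []).take n := by
  simp [List.getD_eq_getElem?_getD, List.getElem?_eq_getElem hi,
    List.getElem?_eq_getElem (show i < (grid.map (fun r => r.take n)).length by simpa using hi)]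

-- ===== VERDICT (by name: the statement is the Claim_ definition above) =====
theorem countPyramids_spec : Claim_equal_countPyramids := by
  intro grid _ hpre
  obtain ⟨hne, hrow⟩ := hpre
  unfold Spec_countPyramids countPyramids_alt
  have hm : 1 ≤ grid.length := List.length_pos_of_ne_nil hne
  rw [pvA_unfold, pv_init grid _ hrow]
  -- facts about the initial dp = grid.map (take n)
  have hinitval : ∀ r, r < grid.length → ∀ t, t < (grid.headD []).length →
      ((grid.map (fun x => x.take ((grid.headD []).length))).getD r []).getD t 0
        = pvGet2 grid r t := by
    intro r hr t ht
    rw [pv_getD_map_take grid _ r hr, pv_getD_take _ _ _ ht]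
    rfl
  have hinitlen : ∀ r, r < grid.length →
      (grid.headD []).length ≤ ((grid.map (fun x => x.take ((grid.headD []).length))).getD r []).length := by
    intro r hr
    rw [pv_getD_map_take grid _ r hr]
    have hg : grid.getD r [] = grid[r] := by
      simp [List.getD_eq_getElem?_getD, List.getElem?_eq_getElem hr]
    rw [hg, List.length_take]
    have := hrow _ (List.getElem_mem hr)
    omega
  rw [pv_outer_up grid ((grid.headD []).length) (grid.length - 1) _ 0
    (le_refl _) (by simp)
    (fun r hr1 hr2 t ht => by
      rw [hinitval r hr2 t ht, pvUp.eq_def, dif_pos (Or.inl (by omega))])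
    (fun r hr => ⟨fun t ht => hinitval r (by omega) t ht, hinitlen r (by omega)⟩)]
  rw [pv_outer_down grid ((grid.headD []).length) (grid.length - 1) 1 _ _
    (le_refl _) (by omega) (by simp)
    (fun r hr t ht => by
      rw [hinitval r (by omega) t ht, pvDown.eq_def, dif_pos (Or.inl (by omega))])
    (fun r hr1 hr2 => ⟨fun t ht => hinitval r hr2 t ht, hinitlen r hr2⟩)]
  rw [pv_fold_add grid (pvDown grid ((grid.headD []).length)) ((grid.headD []).length)
    (List.range' 1 (grid.length - 1))]
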